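-- pv_equiv track=rewrite | github.com/venkatmiriyala19/CodingNinjas | Fish Eater.py | fishEater
-- ===== SOURCE A (Python) =====
-- def fishEater(fishes):
--     a=len(fishes)
--     b=fishes[0]
--     for i in range(1,a):
--         if b>fishes[i]:
--             a-=1
--         else:
--             b=fishes[i]
--     return a
--     # Write your code here.
--     pass
-- ===== SOURCE B (Python) =====
-- def fishEater(fishes):
--     # Pass 1: build the prefix-maximum table.
--     pm = []
--     m = None
--     for x in fishes:
--         m = x if m is None or x > m else m
--         pm.append(m)
--     # Pass 2: a fish survives exactly when it equals its prefix maximum.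
--     return sum(1 for x, p in zip(fishes, pm) if x == p)
-- ===== Notes on version B (the rewrite author's own statement) =====
-- stated objective: alternative
-- what changed: Replaces A's fused running-max loop that decrements a counter for each eaten fish by two separate passes: first build the prefix-maximum table, then count the elements equal to their prefix maximum.
import Mathlib
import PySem

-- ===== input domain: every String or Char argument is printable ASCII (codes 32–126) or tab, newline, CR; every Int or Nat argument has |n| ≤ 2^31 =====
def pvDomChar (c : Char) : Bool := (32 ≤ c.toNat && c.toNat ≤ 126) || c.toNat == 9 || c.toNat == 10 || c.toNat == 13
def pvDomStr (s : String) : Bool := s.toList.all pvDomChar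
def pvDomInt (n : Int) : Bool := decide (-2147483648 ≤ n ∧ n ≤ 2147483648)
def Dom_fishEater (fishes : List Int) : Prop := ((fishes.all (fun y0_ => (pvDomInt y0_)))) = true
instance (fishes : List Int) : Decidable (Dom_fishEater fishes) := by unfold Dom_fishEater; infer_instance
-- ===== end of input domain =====

-- B replaces A's fused counting loop by two passes (prefix-max table, then a count of elements
-- equal to their prefix max); same O(n) cost, different decomposition.


-- ===== PORT A =====
-- literal port of A: a = len(fishes); b = fishes[0]; for i in range(1, a): …
-- (fishes[0] is exact under Pre_; fishes[i] for i in range(1, len) is always in range, so pyGetD is exact)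
def fishEater (fishes : List Int) : Int :=
  let a : Int := fishes.length
  let b : Int := PySem.List.pyGetD fishes 0 0
  let st := (PySem.List.pyRange 1 (fishes.length : Int) 1).foldl
    (fun (s : Int × Int) i =>
      if s.2 > PySem.List.pyGetD fishes i 0 then (s.1 - 1, s.2)
      else (s.1, PySem.List.pyGetD fishes i 0)) (a, b)
  st.1

-- ===== PORT B =====
-- literal port of Source B: build the prefix-max table pm, then count x == p over zip(fishes, pm)
def fishEater_alt (fishes : List Int) : Int :=
  let st := fishes.foldl
    (fun (s : List Int × Option Int) x =>
      let m : Int := match s.2 with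
        | none => x
        | some m0 => if x > m0 then x else m0
      (s.1 ++ [m], some m)) ([], none)
  let pm := st.1
  (((fishes.zip pm).filter (fun p => p.1 == p.2)).length : Int)

-- ===== PRECONDITION & SPEC =====
-- Pre_ excludes exactly the empty list, on which A's 'fishes[0]' raises IndexError.
def Pre_fishEater (fishes : List Int) : Prop := fishes ≠ []
instance (fishes : List Int) : Decidable (Pre_fishEater fishes) := by unfold Pre_fishEater; infer_instance
def pvWitness_fishEater : List Int := [3, 1, 4]

def Spec_fishEater (fishes : List Int) (out : Int) : Prop := out = fishEater_alt fishes
instance (fishes : List Int) (out : Int) : Decidable (Spec_fishEater fishes out) := by unfold Spec_fishEater; infer_instance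

-- ===== CLAIM (what is proved, stated in full; the proofs are below) =====
def Claim_equal_fishEater : Prop := ∀ (fishes : List Int), Dom_fishEater fishes → Pre_fishEater fishes → Spec_fishEater fishes (fishEater fishes)
-- ===== LEMMAS AND PROOFS =====

-- the prefix-max table of xs continued from a running max m
def pmT : List Int → Int → List Int
  | [], _ => []
  | v :: t, m => let m' := if v > m then v else m; m' :: pmT t m'

-- B's table-building fold appends pmT xs m to the accumulator once the running max is some m
lemma foldB_eq_pmT (xs : List Int) (acc : List Int) (m : Int) :
    (xs.foldl (fun (s : List Int × Option Int) x =>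
      (s.1 ++ [match s.2 with
               | none => x
               | some m0 => if x > m0 then x else m0],
       some (match s.2 with
             | none => x
             | some m0 => if x > m0 then x else m0))) (acc, some m)).1 = acc ++ pmT xs m := by
  induction xs generalizing acc m with
  | nil => simp [pmT]
  | cons v t ih =>
      simp only [List.foldl, pmT]
      rw [ih]
      simp

-- A's loop value, characterised by the survivor count against the prefix-max table
lemma foldA_count (xs : List Int) (a m : Int) :
    (xs.foldl (fun (s : Int × Int) v =>
        if s.2 > v then (s.1 - 1, s.2) else (s.1, v)) (a, m)).1
      = a - (xs.length : Int) + (((xs.zip (pmT xs m)).filter (fun p => p.1 == p.2)).length : Int) := by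
  induction xs generalizing a m with
  | nil => simp [pmT]
  | cons v t ih =>
      simp only [List.foldl, pmT, List.zip_cons_cons, List.filter]
      by_cases h : m > v
      · have hm' : (if v > m then v else m) = m := by
          rw [if_neg]; omega
        rw [hm']
        have hne : (v == m) = false := beq_eq_false_iff_ne.mpr (by omega)
        simp only [if_pos h, hne]
        rw [ih]
        simp only [List.length_cons]
        push_cast
        ring
      · have hv : (if v > m then v else m) = v := by
          by_cases hvm : v > m
          · rw [if_pos hvm]
          · rw [if_neg hvm]; omega
        rw [hv]
        simp only [if_neg h, beq_self_eq_true, List.length_cons]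
        rw [ih]
        push_cast
        ring

-- ===== VERDICT (by name: the statement is the Claim_ definition above) =====
theorem fishEater_spec : Claim_equal_fishEater := by
  intro fishes _hdom hpre
  unfold Spec_fishEater fishEater fishEater_alt
  obtain ⟨x, xs, rfl⟩ : ∃ y ys, fishes = y :: ys := by
    cases fishes with
    | nil => exact absurd rfl hpre
    | cons y ys => exact ⟨y, ys, rfl⟩
  simp only []
  rw [PySem.List.foldl_pyRange_pyGetD' (x :: xs) 0
        (fun (s : Int × Int) v => if s.2 > v then (s.1 - 1, s.2) else (s.1, v)) _ (by norm_num),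
      PySem.List.pyGetD_zero_cons]
  show (((x :: xs).drop 1).foldl _ (((x :: xs).length : Int), x)).1 = _
  rw [List.drop_one, List.tail_cons, foldA_count]
  simp only [List.foldl]
  rw [List.nil_append, foldB_eq_pmT xs [x] x]
  have hx : ([x] ++ pmT xs x) = x :: pmT xs x := rfl
  rw [hx, List.zip_cons_cons]
  simp only [List.length_cons, List.filter_cons, beq_self_eq_true, if_true]
  push_cast
  ring
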